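-- pv_equiv track=rewrite | github.com/cyborgoat/swarm | swarm/web/browser/extractor.py | _filter_content_by_query
-- ===== SOURCE A (Python) =====
-- def _filter_content_by_query(content: str, query: str) -> str:
--     """Filter content based on search query."""
--     if not query or not content:
--         return content
--
--     query_words = [word.lower() for word in query.split()]
--     sentences = content.split(".")
--     relevant_sentences = []
--
--     for sentence in sentences:
--         sentence = sentence.strip()
--         if not sentence:
--             continue
--
--         sentence_lower = sentence.lower()
--
--         # Score sentence based on query word matches
--         score = sum(1 for word in query_words if word in sentence_lower)
--
--         # Include sentences with at least one query word
--         if score > 0: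
--             relevant_sentences.append((sentence, score))
--
--     if relevant_sentences:
--         # Sort by score and take top sentences
--         relevant_sentences.sort(key=lambda x: x[1], reverse=True)
--         top_sentences = [s[0] for s in relevant_sentences[:20]]  # Top 20 sentences
--         return ". ".join(top_sentences)
--
--     return content  # Return full content if no matches
-- ===== SOURCE B (Python) =====
-- def _filter_content_by_query(content: str, query: str) -> str:
--     """Filter content based on search query (counting-sort by score instead of comparison sort)."""
--     if not query or not content:
--         return content
--
--     query_words = [word.lower() for word in query.split()]
--     relevant = []
--     for sentence in content.split("."):
--         sentence = sentence.strip()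
--         if not sentence:
--             continue
--         low = sentence.lower()
--         score = sum(1 for word in query_words if word in low)
--         if score > 0:
--             relevant.append((sentence, score))
--
--     if not relevant:
--         return content
--
--     # scores lie in 1..len(query_words): sweep buckets from highest score down
--     ordered = []
--     for s in range(len(query_words), 0, -1):
--         ordered.extend(sent for sent, sc in relevant if sc == s)
--     return ". ".join(ordered[:20])
-- ===== Notes on version B (the rewrite author's own statement) =====
-- stated objective: alternative
-- what changed: The comparison sort of (sentence, score) pairs with reverse=True is replaced by a counting-sort-style sweep: scores are bounded by the number of query words, so B walks possible scores from highest to 1 and collects matching sentences in document order, preserving the stable tie order without sorting.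
import Mathlib
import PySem

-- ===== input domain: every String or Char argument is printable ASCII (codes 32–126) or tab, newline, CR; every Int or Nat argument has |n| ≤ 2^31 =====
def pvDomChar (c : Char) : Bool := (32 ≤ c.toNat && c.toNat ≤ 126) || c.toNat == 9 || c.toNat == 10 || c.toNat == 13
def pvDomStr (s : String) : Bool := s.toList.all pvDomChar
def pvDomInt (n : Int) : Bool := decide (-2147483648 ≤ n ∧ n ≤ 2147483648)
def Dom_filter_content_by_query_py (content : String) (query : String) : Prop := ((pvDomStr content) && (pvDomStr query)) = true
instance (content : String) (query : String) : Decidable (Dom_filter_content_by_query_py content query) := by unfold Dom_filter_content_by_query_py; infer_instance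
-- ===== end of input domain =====

-- B replaces the reverse comparison sort of (sentence, score) pairs by a counting-sort-style
-- sweep over the bounded score range (alternative algorithm, same cost class on typical input).


-- ===== PORT A =====
-- the common scoring pass: for each sentence, strip, skip empties, score by query-word hits,
-- keep (sentence, score) when score > 0   (shared verbatim by both Pythons)
def pvRelevant (query_words : List String) (sentences : List String) : List (String × Int) :=
  sentences.foldl (fun acc sentence =>
    let sentence := PySem.Str.strip sentence
    if sentence = "" then acc
    else
      let sentence_lower := PySem.Str.lower sentence
      let score : Int := (query_words.map (fun word => if PySem.Str.isIn word sentence_lower then (1 : Int) else 0)).sum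
      if score > 0 then acc ++ [(sentence, score)] else acc) []

def filter_content_by_query_py (content : String) (query : String) : String :=
  if query = "" ∨ content = "" then content
  else
    let query_words := (PySem.Str.split₀ query).map PySem.Str.lower
    let sentences := (PySem.Str.split? content ".").getD []   -- sep "." ≠ "", so split? is some: exact
    let relevant_sentences := pvRelevant query_words sentences
    if relevant_sentences ≠ [] then
      let sorted_rel := PySem.List.sorted relevant_sentences (fun x => x.2) true
      let top_sentences := (PySem.List.slice sorted_rel none (some 20)).map (fun s => s.1)
      PySem.Str.join ". " top_sentences
    else content

-- ===== PORT B =====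
def filter_content_by_query_py_alt (content : String) (query : String) : String :=
  if query = "" ∨ content = "" then content
  else
    let query_words := (PySem.Str.split₀ query).map PySem.Str.lower
    let relevant := pvRelevant query_words ((PySem.Str.split? content ".").getD [])
    if relevant = [] then content
    else
      -- scores lie in 1..len(query_words): sweep buckets from highest score down
      let ordered := (PySem.List.pyRange (PySem.List.len query_words) 0 (-1)).foldl
        (fun acc s => acc ++ (relevant.filter (fun p => p.2 == s)).map (fun p => p.1)) []
      PySem.Str.join ". " (PySem.List.slice ordered none (some 20))

-- ===== PRECONDITION & SPEC =====
def Spec_filter_content_by_query_py (content : String) (query : String) (out : String) : Prop := out = filter_content_by_query_py_alt content query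
instance (content : String) (query : String) (out : String) : Decidable (Spec_filter_content_by_query_py content query out) := by unfold Spec_filter_content_by_query_py; infer_instance

-- ===== CLAIM (what is proved, stated in full; the proofs are below) =====
def Claim_equal_filter_content_by_query_py : Prop := ∀ (content : String) (query : String), Dom_filter_content_by_query_py content query → Spec_filter_content_by_query_py content query (filter_content_by_query_py content query)

-- ===== LEMMAS AND PROOFS =====

-- descending buckets: bucketsF n l = (elements of l with score n) ++ … ++ (elements with score 1)
def bucketsF (n : Nat) (l : List (String × Int)) : List (String × Int) :=
  match n with
  | 0 => []
  | n + 1 => l.filter (fun p => p.2 == ((n : Int) + 1)) ++ bucketsF n l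

theorem bucketsF_nil (n : Nat) : bucketsF n [] = [] := by
  induction n with
  | zero => rfl
  | succ n ih => simp [bucketsF, ih]

theorem mem_bucketsF {n : Nat} {l : List (String × Int)} {p : String × Int}
    (h : p ∈ bucketsF n l) : p.2 ≤ (n : Int) := by
  induction n with
  | zero => simp [bucketsF] at h
  | succ n ih =>
    simp only [bucketsF, List.mem_append, List.mem_filter] at h
    rcases h with ⟨-, h⟩ | h
    · have := of_decide_eq_true h; push_cast; omega
    · have := ih h; push_cast; omega

theorem bucketsF_append_gt {n : Nat} {x : String × Int} (l : List (String × Int))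
    (h : (n : Int) < x.2) : bucketsF n (l ++ [x]) = bucketsF n l := by
  induction n with
  | zero => rfl
  | succ n ih =>
    have hx : (x.2 == ((n : Int) + 1)) = false := by
      simp only [beq_eq_false_iff_ne]; push_cast at h ⊢; omega
    have ih' := ih (by push_cast at h ⊢; omega)
    simp [bucketsF, List.filter_append, hx, ih']

theorem insertBy_append_no {α : Type} (bf : α → α → Bool) (x : α) {ys : List α} (zs : List α)
    (h : ∀ y ∈ ys, bf x y = false) :
    PySem.List.insertBy bf x (ys ++ zs) = ys ++ PySem.List.insertBy bf x zs := by
  induction ys with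
  | nil => rfl
  | cons y ys ih =>
    have hy := h y (by simp)
    simp only [List.cons_append, PySem.List.insertBy, hy, Bool.false_eq_true, if_false]
    rw [ih (fun y hy => h y (by simp [hy]))]

theorem insertBy_all_true {α : Type} (bf : α → α → Bool) (x : α) (zs : List α)
    (h : ∀ z ∈ zs, bf x z = true) :
    PySem.List.insertBy bf x zs = x :: zs := by
  cases zs with
  | nil => rfl
  | cons z zs => simp [PySem.List.insertBy, h z (by simp)]

theorem insert_buckets (n : Nat) (l : List (String × Int)) (x : String × Int)
    (h1 : 1 ≤ x.2) (h2 : x.2 ≤ (n : Int)) :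
    PySem.List.insertBy (fun a b => decide (b.2 < a.2)) x (bucketsF n l) = bucketsF n (l ++ [x]) := by
  induction n generalizing l with
  | zero => simp at h2; omega
  | succ n ih =>
    by_cases hx : x.2 = (n : Int) + 1
    · have hno : ∀ y ∈ l.filter (fun p => p.2 == ((n : Int) + 1)),
          (fun a b => decide (b.2 < a.2)) x y = false := by
        intro y hy
        have := (List.mem_filter.mp hy).2
        have := of_decide_eq_true this
        simp only [decide_eq_false_iff_not, not_lt]; omega
      have hall : ∀ z ∈ bucketsF n l, (fun a b => decide (b.2 < a.2)) x z = true := by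
        intro z hz
        have := mem_bucketsF hz
        simp only [decide_eq_true_eq]; omega
      rw [bucketsF, insertBy_append_no _ _ _ hno, insertBy_all_true _ _ _ hall]
      have hxf : (x.2 == ((n : Int) + 1)) = true := by simp [hx]
      rw [bucketsF, List.filter_append, bucketsF_append_gt l (by omega)]
      simp [hxf]
    · have hx' : x.2 ≤ (n : Int) := by push_cast at h2 ⊢; omega
      have hno : ∀ y ∈ l.filter (fun p => p.2 == ((n : Int) + 1)),
          (fun a b => decide (b.2 < a.2)) x y = false := by
        intro y hy
        have := (List.mem_filter.mp hy).2
        have := of_decide_eq_true this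
        simp only [decide_eq_false_iff_not, not_lt]; omega
      have hxf : (x.2 == ((n : Int) + 1)) = false := by simp [hx]
      rw [bucketsF, insertBy_append_no _ _ _ hno, ih l hx']
      rw [bucketsF, List.filter_append]
      simp [hxf]

theorem sorted_eq_bucketsF (n : Nat) (l : List (String × Int))
    (h : ∀ p ∈ l, 1 ≤ p.2 ∧ p.2 ≤ (n : Int)) :
    PySem.List.sorted l (fun x => x.2) true = bucketsF n l := by
  rw [PySem.List.sorted_rev_eq_foldl_insertBy]
  induction l using List.reverseRecOn with
  | nil => simp [bucketsF_nil]
  | append_singleton l x ih =>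
    rw [List.foldl_append, List.foldl_cons, List.foldl_nil]
    rw [ih (fun p hp => h p (by simp [hp]))]
    exact insert_buckets n l x (h x (by simp)).1 (h x (by simp)).2

-- the descending range [n, …, 1]
def descList (n : Nat) : List Int :=
  match n with
  | 0 => []
  | n + 1 => ((n : Int) + 1) :: descList n

theorem pyRange_desc (n : Nat) : PySem.List.pyRange (n : Int) 0 (-1) = descList n := by
  rw [PySem.List.pyRange_neg_one]
  induction n with
  | zero => simp [descList]
  | succ n ih =>
    have : ((n : Int) + 1 - 0).toNat = n + 1 := by omega
    push_cast at ih ⊢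
    simp only [sub_zero] at ih ⊢
    rw [show ((n : Int) + 1).toNat = n + 1 by omega, List.range_succ_eq_map]
    rw [show ((n : Int)).toNat = n by omega] at ih
    simp only [List.map_cons, List.map_map, descList, List.cons.injEq]
    refine ⟨by push_cast; ring, ?_⟩
    rw [← ih]; apply List.map_congr_left; intro k _; simp only [Function.comp_apply]; push_cast; ring

theorem flatMap_desc_eq_bucketsF (n : Nat) (l : List (String × Int)) :
    (descList n).flatMap (fun s => l.filter (fun p => p.2 == s)) = bucketsF n l := by
  induction n with
  | zero => rfl
  | succ n ih => simp only [descList, List.flatMap_cons, bucketsF, ih]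

-- every pair produced by the scoring pass has a score in 1..(number of query words)
theorem pvRelevant_bounds (query_words : List String) (sentences : List String) :
    ∀ p ∈ pvRelevant query_words sentences, 1 ≤ p.2 ∧ p.2 ≤ (query_words.length : Int) := by
  unfold pvRelevant
  suffices H : ∀ (ss : List String) (acc : List (String × Int)),
      (∀ p ∈ acc, 1 ≤ p.2 ∧ p.2 ≤ (query_words.length : Int)) →
      ∀ p ∈ ss.foldl (fun acc sentence =>
        let sentence := PySem.Str.strip sentence
        if sentence = "" then acc
        else
          let sentence_lower := PySem.Str.lower sentence
          let score : Int := (query_words.map (fun word => if PySem.Str.isIn word sentence_lower then (1 : Int) else 0)).sum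
          if score > 0 then acc ++ [(sentence, score)] else acc) acc,
        1 ≤ p.2 ∧ p.2 ≤ (query_words.length : Int) by
    exact H sentences [] (by simp)
  intro ss
  induction ss with
  | nil => intro acc hacc; simpa using hacc
  | cons s ss ih =>
    intro acc hacc
    rw [List.foldl_cons]
    apply ih
    simp only
    split_ifs with h1 h2
    · exact hacc
    · intro p hp
      rcases List.mem_append.mp hp with hp | hp
      · exact hacc p hp
      · simp only [List.mem_singleton] at hp
        subst hp
        refine ⟨by omega, ?_⟩
        simp only
        rw [PySem.List.sum_map_ite_one_zero]
        exact_mod_cast List.countP_le_length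
    · exact hacc

-- the heart: stable reverse sort by score projected to sentences = the descending bucket sweep
theorem main_lists (query_words : List String) (relevant : List (String × Int))
    (h : ∀ p ∈ relevant, 1 ≤ p.2 ∧ p.2 ≤ (query_words.length : Int)) :
    (PySem.List.pyRange (PySem.List.len query_words) 0 (-1)).foldl
        (fun acc s => acc ++ (relevant.filter (fun p => p.2 == s)).map (fun p => p.1)) []
      = (PySem.List.sorted relevant (fun x => x.2) true).map (fun s => s.1) := by
  rw [PySem.List.foldl_append_eq_flatMap, List.nil_append, PySem.List.len_eq,
      pyRange_desc, sorted_eq_bucketsF query_words.length relevant h,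
      ← flatMap_desc_eq_bucketsF, List.map_flatMap]

-- ===== VERDICT (by name: the statement is the Claim_ definition above) =====
theorem filter_content_by_query_py_spec : Claim_equal_filter_content_by_query_py := by
  intro content query _
  unfold Spec_filter_content_by_query_py filter_content_by_query_py filter_content_by_query_py_alt
  split_ifs with h0
  · rfl
  · simp only
    set query_words := (PySem.Str.split₀ query).map PySem.Str.lower with hqw
    set relevant := pvRelevant query_words ((PySem.Str.split? content ".").getD []) with hrel
    by_cases hne : relevant = []
    · simp [hne]
    · simp only [hne, ne_eq, not_false_eq_true, if_true, if_false]
      rw [main_lists query_words relevant (pvRelevant_bounds query_words _)]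
      rw [PySem.List.slice_to _ (by norm_num), PySem.List.slice_to _ (by norm_num),
          List.map_take]
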